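-- pv_equiv track=rewrite | github.com/SadiaZahin/sentimentanalysis-twitterdata | NLP-Sentiment-Analysis/SentimentClassifiers.py | create_final_training_set
-- ===== SOURCE A (Python) =====
-- def create_final_training_set(tweets_emotions, tweets_list):
--     training_tweet_list = []
--     training_tweet_id_list = []
--     for (i, j) in tweets_emotions:
--         for (l, m) in tweets_list:
--             if i == l:
--                 training_tweet_list.append((m, l))
--                 break
--
--     return training_tweet_list
-- ===== SOURCE B (Python) =====
-- def create_final_training_set(tweets_emotions, tweets_list):
--     first = {}
--     for (l, m) in tweets_list:
--         if l not in first: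
--             first[l] = m
--     training_tweet_list = []
--     for (i, j) in tweets_emotions:
--         if i in first:
--             training_tweet_list.append((first[i], i))
--     return training_tweet_list
-- ===== Notes on version B (the rewrite author's own statement) =====
-- stated objective: faster
-- what changed: Replaced the inner linear scan of tweets_list for every emotion tuple by a dict of first occurrences (id -> tweet) built once, then a single O(1)-lookup pass over tweets_emotions.
import Mathlib
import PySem

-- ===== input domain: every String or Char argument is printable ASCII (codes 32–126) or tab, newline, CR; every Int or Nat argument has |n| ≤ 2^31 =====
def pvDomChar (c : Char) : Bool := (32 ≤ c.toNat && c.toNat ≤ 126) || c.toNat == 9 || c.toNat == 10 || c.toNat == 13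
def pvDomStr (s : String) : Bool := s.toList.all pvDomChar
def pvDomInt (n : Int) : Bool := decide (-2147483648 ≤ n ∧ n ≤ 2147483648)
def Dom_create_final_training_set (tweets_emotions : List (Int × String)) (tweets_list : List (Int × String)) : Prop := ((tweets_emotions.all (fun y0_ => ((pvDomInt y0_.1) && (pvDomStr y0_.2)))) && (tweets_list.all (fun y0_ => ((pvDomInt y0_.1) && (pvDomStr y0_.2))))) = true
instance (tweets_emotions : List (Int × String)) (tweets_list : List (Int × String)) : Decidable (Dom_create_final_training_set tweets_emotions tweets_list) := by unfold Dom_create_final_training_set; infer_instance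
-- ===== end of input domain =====

-- B replaces A's inner scan of tweets_list per emotion by a first-occurrence dict built once (objective: faster, O(n*m) → O(n+m)).

-- ===== PORT A =====
-- inner 'for (l, m) in tweets_list: if i == l: append (m, l); break'
def cftsInner (i : Int) : List (Int × String) → Option (String × Int)
  | [] => none
  | (l, m) :: rest => if i = l then some (m, l) else cftsInner i rest

def create_final_training_set (tweets_emotions : List (Int × String)) (tweets_list : List (Int × String)) : List (String × Int) :=
  tweets_emotions.foldl
    (fun acc p =>
      match cftsInner p.1 tweets_list with
      | some q => acc ++ [q]
      | none => acc)
    []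

-- ===== PORT B =====
-- first-occurrence dict: 'if l not in first: first[l] = m'
def cftsFirst (tweets_list : List (Int × String)) : PySem.Dict Int String :=
  tweets_list.foldl
    (fun d p => if d.contains p.1 then d else d.insert p.1 p.2)
    PySem.Dict.empty

def create_final_training_set_alt (tweets_emotions : List (Int × String)) (tweets_list : List (Int × String)) : List (String × Int) :=
  let first := cftsFirst tweets_list
  tweets_emotions.foldl
    (fun acc p =>
      match first.get? p.1 with
      | some m => acc ++ [(m, p.1)]
      | none => acc)
    []

-- ===== PRECONDITION & SPEC =====
def Spec_create_final_training_set (tweets_emotions : List (Int × String)) (tweets_list : List (Int × String)) (out : List (String × Int)) : Prop := out = create_final_training_set_alt tweets_emotions tweets_list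
instance (tweets_emotions : List (Int × String)) (tweets_list : List (Int × String)) (out : List (String × Int)) : Decidable (Spec_create_final_training_set tweets_emotions tweets_list out) := by unfold Spec_create_final_training_set; infer_instance

-- ===== CLAIM (what is proved, stated in full; the proofs are below) =====
def Claim_equal_create_final_training_set : Prop := ∀ (tweets_emotions : List (Int × String)) (tweets_list : List (Int × String)), Dom_create_final_training_set tweets_emotions tweets_list → Spec_create_final_training_set tweets_emotions tweets_list (create_final_training_set tweets_emotions tweets_list)

-- ===== LEMMAS AND PROOFS =====

-- the dict-build loop, started from any d, looks up to d's value or else the first match in the rest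
lemma cftsFirst_fold_get? (ts : List (Int × String)) (d : PySem.Dict Int String) (i : Int) :
    (ts.foldl (fun d p => if d.contains p.1 then d else d.insert p.1 p.2) d).get? i
      = ((d.get? i).or ((cftsInner i ts).map Prod.fst)) := by
  induction ts generalizing d with
  | nil => cases h : d.get? i <;> simp [cftsInner, h]
  | cons hd tl ih =>
    simp only [List.foldl_cons]
    rw [ih]
    by_cases hc : d.contains hd.1 = true
    · simp only [hc, if_true]
      rcases hs : d.get? i with _ | v
      · have : i ≠ hd.1 := by
          intro h
          rw [h] at hs
          rw [PySem.Dict.contains_eq_isSome_get?, hs] at hc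
          simp at hc
        simp [cftsInner, this]
      · simp
    · simp only [Bool.not_eq_true] at hc
      simp only [hc, Bool.false_eq_true, if_false]
      rw [PySem.Dict.get?_insert]
      by_cases hi : i = hd.1
      · have hs : d.get? i = none := by
          rw [PySem.Dict.contains_eq_isSome_get?] at hc
          cases h : d.get? i
          · rfl
          · rw [hi] at h; rw [h] at hc; simp at hc
        rw [hi] at hs
        simp [hi, hs, cftsInner]
      · simp [hi, cftsInner]

lemma cftsFirst_get? (ts : List (Int × String)) (i : Int) :
    (cftsFirst ts).get? i = (cftsInner i ts).map Prod.fst := by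
  unfold cftsFirst
  rw [cftsFirst_fold_get? ts PySem.Dict.empty i]
  simp

-- when cftsInner finds a pair, its second component is the searched id
lemma cftsInner_snd (i : Int) (ts : List (Int × String)) (q : String × Int)
    (h : cftsInner i ts = some q) : q.2 = i := by
  induction ts with
  | nil => simp [cftsInner] at h
  | cons hd tl ih =>
    by_cases hi : i = hd.1
    · simp [cftsInner, hi] at h
      rw [← h]
      simpa using hi.symm
    · simp [cftsInner, hi] at h
      exact ih h

-- ===== VERDICT (by name: the statement is the Claim_ definition above) =====
theorem create_final_training_set_spec : Claim_equal_create_final_training_set := by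
  intro tweets_emotions tweets_list hD
  unfold Spec_create_final_training_set create_final_training_set create_final_training_set_alt
  simp only []
  clear hD
  induction tweets_emotions using List.reverseRecOn with
  | nil => rfl
  | append_singleton es p ih =>
    simp only [List.foldl_append, List.foldl_cons, List.foldl_nil, ih]
    rw [cftsFirst_get? tweets_list p.1]
    rcases h : cftsInner p.1 tweets_list with _ | q
    · simp
    · have hq := cftsInner_snd p.1 tweets_list q h
      simp only [Option.map_some]
      rw [← hq]
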